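-- pv_equiv track=rewrite | github.com/Mingowzm/llmsys_s25_hw4 | pipeline/pipe.py | _clock_cycles
-- ===== SOURCE A (Python) =====
-- from typing import Any, Iterable, Iterator, List, Optional, Union, Sequence, Tuple, cast
--
-- def _clock_cycles(num_batches: int, num_partitions: int) -> Iterable[List[Tuple[int, int]]]:
--     '''Generate schedules for each clock cycle.
--
--     An example of the generated schedule for m=3 and n=3 is as follows:
--
--     k (i,j) (i,j) (i,j)
--     - ----- ----- -----
--     0 (0,0)
--     1 (1,0) (0,1)
--     2 (2,0) (1,1) (0,2)
--     3       (2,1) (1,2)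
--     4             (2,2)
--
--     where k is the clock number, i is the index of micro-batch, and j is the index of partition.
--
--     Each schedule is a list of tuples. Each tuple contains the index of micro-batch and the index of partition.
--     This function should yield schedules for each clock cycle.
--     '''
--     # BEGIN SOLUTION
--     total_clock_cycles = num_batches + num_partitions - 1
--
--     for clock in range(total_clock_cycles):
--         current_step = [
--             (microbatch_id, stage_id)
--             for microbatch_id in range(num_batches)
--             if 0 <= (stage_id := clock - microbatch_id) < num_partitions
--         ]
--         yield current_step
-- ===== SOURCE B (Python) =====
-- def _clock_cycles(num_batches: int, num_partitions: int):
--     # Bucket pass: allocate one bucket per clock, then a single sweep over the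
--     # (microbatch, stage) grid drops each task into bucket i+j; finally yield buckets.
--     total = num_batches + num_partitions - 1
--     sched = [[] for _ in range(total)]
--     for i in range(num_batches):
--         for j in range(num_partitions):
--             sched[i + j].append((i, j))
--     yield from sched
-- ===== Notes on version B (the rewrite author's own statement) =====
-- stated objective: alternative
-- what changed: Instead of generating each clock's list by scanning all microbatches and filtering per clock, B preallocates one bucket per clock and makes a single sweep over the (microbatch, stage) grid, appending each pair (i, j) into bucket i+j, then yields the buckets.
import Mathlib
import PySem

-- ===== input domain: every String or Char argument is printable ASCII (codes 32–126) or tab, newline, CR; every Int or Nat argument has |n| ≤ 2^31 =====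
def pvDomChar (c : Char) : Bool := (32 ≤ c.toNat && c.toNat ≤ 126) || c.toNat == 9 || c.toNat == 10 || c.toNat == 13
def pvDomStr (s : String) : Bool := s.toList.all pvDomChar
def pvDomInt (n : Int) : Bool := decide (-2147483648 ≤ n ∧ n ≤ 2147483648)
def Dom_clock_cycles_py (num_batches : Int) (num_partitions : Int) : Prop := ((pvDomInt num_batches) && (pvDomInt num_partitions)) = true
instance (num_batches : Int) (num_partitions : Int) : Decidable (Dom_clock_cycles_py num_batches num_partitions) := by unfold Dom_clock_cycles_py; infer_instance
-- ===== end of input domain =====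

-- B replaces A's per-clock scan-and-filter with one sweep over the (microbatch, stage) grid that drops each pair into a per-clock bucket (alternative algorithm, same return value).


-- ===== PORT A =====
-- per clock: comprehension over all microbatch ids, filtered by 0 <= clock - i < n
def clock_cycles_py (num_batches : Int) (num_partitions : Int) : List (List (Int × Int)) :=
  (PySem.List.pyRange 0 (num_batches + num_partitions - 1) 1).map (fun clock =>
    ((PySem.List.pyRange 0 num_batches 1).filter
        (fun i => decide (0 ≤ clock - i) && decide (clock - i < num_partitions))).map
      (fun i => (i, clock - i)))

-- ===== PORT B =====
-- preallocate one empty bucket per clock, then sweep the (i, j) grid appending (i, j) to bucket i+j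
def clock_cycles_py_alt (num_batches : Int) (num_partitions : Int) : List (List (Int × Int)) :=
  let sched : List (List (Int × Int)) :=
    (PySem.List.pyRange 0 (num_batches + num_partitions - 1) 1).map (fun _ => [])
  (PySem.List.pyRange 0 num_batches 1).foldl (fun sched i =>
    (PySem.List.pyRange 0 num_partitions 1).foldl (fun sched j =>
      sched.modify (i + j).toNat (fun l => l ++ [(i, j)])) sched) sched

-- ===== PRECONDITION & SPEC =====
def Spec_clock_cycles_py (num_batches : Int) (num_partitions : Int) (out : List (List (Int × Int))) : Prop := out = clock_cycles_py_alt num_batches num_partitions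
instance (num_batches : Int) (num_partitions : Int) (out : List (List (Int × Int))) : Decidable (Spec_clock_cycles_py num_batches num_partitions out) := by unfold Spec_clock_cycles_py; infer_instance

-- ===== CLAIM (what is proved, stated in full; the proofs are below) =====
def Claim_equal_clock_cycles_py : Prop := ∀ (num_batches : Int) (num_partitions : Int), Dom_clock_cycles_py num_batches num_partitions → Spec_clock_cycles_py num_batches num_partitions (clock_cycles_py num_batches num_partitions)

-- ===== LEMMAS AND PROOFS =====

-- folding 'append e to bucket (e.1+e.2)' over an event list: bucket k collects exactly the events on diagonal k, in order
theorem bucket_get (E : List (Int × Int)) (B : List (List (Int × Int))) (k : Nat) :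
    (E.foldl (fun s e => s.modify (e.1 + e.2).toNat (fun l => l ++ [e])) B)[k]? =
      B[k]?.map (fun l => l ++ E.filter (fun e => decide ((e.1 + e.2).toNat = k))) := by
  induction E generalizing B with
  | nil => simp
  | cons e E ih =>
    rw [List.foldl_cons, ih, List.getElem?_modify, List.filter_cons]
    cases hB : B[k]? with
    | none => simp
    | some l =>
      by_cases h : (e.1 + e.2).toNat = k <;> simp [h]

-- filtering an integer range by an equality test keeps at most the one point
theorem filter_eq_single (a b t : Int) :
    (PySem.List.pyRange a b 1).filter (fun j => decide (j = t)) =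
      if a ≤ t ∧ t < b then [t] else [] := by
  by_cases hab : b ≤ a
  · rw [PySem.List.pyRange_one_eq_nil hab, if_neg (by omega)]
    rfl
  · have hab : a < b := by omega
    have ih := filter_eq_single (a + 1) b t
    rw [PySem.List.pyRange_one_cons hab, List.filter_cons]
    by_cases h : a = t
    · subst h
      simp only [decide_true, if_true, ih, if_neg (by omega : ¬ (a + 1 ≤ a ∧ a < b)),
        if_pos (by omega : a ≤ a ∧ a < b)]
    · simp only [h, decide_false, Bool.false_eq_true, if_false, ih]
      split_ifs <;> first | rfl | omega
termination_by (b - a).toNat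
decreasing_by omega

-- a flatMap of conditional singletons is a filter-then-map
theorem flatMap_ite_sing {α β : Type} (xs : List α) (p : α → Prop) [DecidablePred p] (g : α → β) :
    xs.flatMap (fun x => if p x then [g x] else []) = (xs.filter (fun x => decide (p x))).map g := by
  induction xs with
  | nil => rfl
  | cons x xs ih =>
    rw [List.flatMap_cons, List.filter_cons]
    by_cases h : p x <;> simp [h, ih]

-- the diagonal-k slice of the full (i, j) grid, in grid order, is A's clock-k row
theorem diag_filter (m n : Int) (k : Nat) :
    (((PySem.List.pyRange 0 m 1).flatMap (fun i =>
        (PySem.List.pyRange 0 n 1).map (fun j => (i, j)))).filter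
      (fun e => decide ((e.1 + e.2).toNat = k))) =
    ((PySem.List.pyRange 0 m 1).filter
        (fun i => decide (0 ≤ (k : Int) - i) && decide ((k : Int) - i < n))).map
      (fun i => (i, (k : Int) - i)) := by
  rw [List.flatMap_def, List.filter_flatten, List.map_map]
  have h1 : ∀ i ∈ PySem.List.pyRange 0 m 1,
      ((List.filter (fun e => decide ((e.1 + e.2).toNat = k)) ∘ fun i =>
          (PySem.List.pyRange 0 n 1).map (fun j => (i, j))) i) =
        (if 0 ≤ (k : Int) - i ∧ (k : Int) - i < n then [(i, (k : Int) - i)] else []) := by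
    intro i hi
    have hi0 : 0 ≤ i := (PySem.List.mem_pyRange_one.mp hi).1
    simp only [Function.comp_apply, List.filter_map]
    have h2 : ∀ j ∈ PySem.List.pyRange 0 n 1,
        ((fun e => decide ((e.1 + e.2).toNat = k)) ∘ fun j => (i, j)) j =
          decide (j = (k : Int) - i) := by
      intro j hj
      have hj0 : 0 ≤ j := (PySem.List.mem_pyRange_one.mp hj).1
      simp only [Function.comp_apply]
      exact decide_eq_decide.mpr (by omega)
    rw [List.filter_congr h2, filter_eq_single]
    split_ifs <;> simp_all
  rw [List.map_congr_left h1, ← List.flatMap_def,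
    flatMap_ite_sing (PySem.List.pyRange 0 m 1) (fun i => 0 ≤ (k : Int) - i ∧ (k : Int) - i < n)
      (fun i => (i, (k : Int) - i))]
  apply congrArg (List.map _)
  apply List.filter_congr
  intro i _
  rw [← Bool.decide_and]

-- B's nested fold is the bucket fold over the flattened grid
theorem alt_eq_bucket_fold (m n : Int) :
    clock_cycles_py_alt m n =
      (((PySem.List.pyRange 0 m 1).flatMap (fun i =>
          (PySem.List.pyRange 0 n 1).map (fun j => (i, j)))).foldl
        (fun s e => s.modify (e.1 + e.2).toNat (fun l => l ++ [e]))
        ((PySem.List.pyRange 0 (m + n - 1) 1).map (fun _ => []))) := by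
  unfold clock_cycles_py_alt
  rw [List.foldl_flatMap]
  simp only [List.foldl_map]

-- ===== VERDICT (by name: the statement is the Claim_ definition above) =====
theorem clock_cycles_py_spec : Claim_equal_clock_cycles_py := by
  intro m n _
  unfold Spec_clock_cycles_py
  rw [alt_eq_bucket_fold]
  apply List.ext_getElem?
  intro k
  rw [bucket_get, diag_filter]
  unfold clock_cycles_py
  rw [List.getElem?_map, List.getElem?_map, PySem.List.getElem?_pyRange_one]
  by_cases hk : k < (m + n - 1 - 0).toNat
  · simp
  · simp
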